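-- pv_equiv track=rewrite | github.com/Kueakun-K/Lab_Data_Struc | Lab10/63010095_Lab10_5.py | MinWeigth
-- ===== SOURCE A (Python) =====
-- def MinWeigth(inp,box,weigth):
--     index = 0
--     for i in range(box):
--         weigthinbox = 0
--         while True:
--             if index == len(inp):
--                 return True
--             if weigth >= inp[index] + weigthinbox:
--                 weigthinbox += inp[index]
--                 index += 1
--             else:
--                 break
--     return False
-- ===== SOURCE B (Python) =====
-- def MinWeigth(inp, box, weigth):
--     # Single pass over the items: count boxes opened by the same greedy rule.
--     used = 0
--     w = 0
--     for item in inp: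
--         if used > 0 and weigth >= w + item:
--             w += item
--         else:
--             if item > weigth:
--                 return False
--             used += 1
--             w = item
--     return used <= box
-- ===== Notes on version B (the rewrite author's own statement) =====
-- stated objective: simpler
-- what changed: Replaces A's nested loop over boxes with an inner while over items by a single pass over the items that counts the boxes the greedy rule opens and compares the count with box at the end.
-- intended difference: On the empty item list with box == 0, A returns False (its for-loop never runs) while B returns True, which is intended since zero items fit in zero boxes; for any non-zero box or non-empty input the two agree everywhere. — e.g. on MinWeigth([], 0, 5): A returns false, B returns true
import Mathlib
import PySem

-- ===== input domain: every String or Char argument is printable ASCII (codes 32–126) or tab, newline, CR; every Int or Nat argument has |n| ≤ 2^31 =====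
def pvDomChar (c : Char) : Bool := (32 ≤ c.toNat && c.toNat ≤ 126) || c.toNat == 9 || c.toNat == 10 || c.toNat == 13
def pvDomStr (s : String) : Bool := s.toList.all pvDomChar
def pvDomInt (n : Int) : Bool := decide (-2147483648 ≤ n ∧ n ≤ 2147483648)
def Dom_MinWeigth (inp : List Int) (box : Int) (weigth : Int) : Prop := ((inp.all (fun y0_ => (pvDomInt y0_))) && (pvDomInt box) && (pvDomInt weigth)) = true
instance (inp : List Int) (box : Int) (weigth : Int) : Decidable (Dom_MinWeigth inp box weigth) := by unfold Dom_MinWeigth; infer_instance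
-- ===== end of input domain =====

-- B replaces A's nested boxes/while loops by one pass over the items that counts
-- opened boxes (objective: simpler); on inp = [] with box = 0 B intentionally
-- returns true where A returns false (see D_MinWeigth).

-- ===== PORT A =====
-- inner while loop of A: the remaining suffix of inp stands for inp[index:];
-- returns none when index reaches len(inp) (A's `return True`), or the
-- current item and the rest at `break`.
def pvInnerA (weigth : Int) : List Int → Int → Option (Int × List Int)
  | [], _ => none
  | x :: rest, wib =>
      if weigth ≥ x + wib then pvInnerA weigth rest (wib + x)
      else some (x, rest)

-- A's `for i in range(box)` loop, one call of the inner loop per box.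
def pvLoopA (weigth : Int) : Nat → List Int → Bool
  | 0, _ => false
  | Nat.succ k, rem =>
      match pvInnerA weigth rem 0 with
      | none => true
      | some (y, rem') => pvLoopA weigth k (y :: rem')

def MinWeigth (inp : List Int) (box : Int) (weigth : Int) : Bool :=
  pvLoopA weigth box.toNat inp

-- ===== PORT B =====
-- B's single for-loop over the items; none encodes B's early `return False`.
def pvLoopB (weigth : Int) : List Int → Int → Int → Option Int
  | [], used, _ => some used
  | item :: rest, used, w =>
      if used > 0 ∧ weigth ≥ w + item then pvLoopB weigth rest used (w + item)
      else if item > weigth then none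
      else pvLoopB weigth rest (used + 1) item

def MinWeigth_alt (inp : List Int) (box : Int) (weigth : Int) : Bool :=
  match pvLoopB weigth inp 0 0 with
  | none => false
  | some used => decide (used ≤ box)

-- ===== PRECONDITION & SPEC =====
-- On inp = [] with box = 0, A returns false (its for-loop body never runs) while
-- B returns true, which is the intended value: zero items fit in zero boxes.
def D_MinWeigth (inp : List Int) (box : Int) (weigth : Int) : Prop := inp = [] ∧ box = 0
instance (inp : List Int) (box : Int) (weigth : Int) : Decidable (D_MinWeigth inp box weigth) := by unfold D_MinWeigth; infer_instance

def Spec_MinWeigth (inp : List Int) (box : Int) (weigth : Int) (out : Bool) : Prop := ¬ D_MinWeigth inp box weigth → out = MinWeigth_alt inp box weigth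
instance (inp : List Int) (box : Int) (weigth : Int) (out : Bool) : Decidable (Spec_MinWeigth inp box weigth out) := by unfold Spec_MinWeigth; infer_instance

def pvDiffWitness_MinWeigth : List Int × Int × Int := ([], 0, 5)
def pvDiffWitnessOut_MinWeigth : Bool × Bool := (false, true)

-- ===== CLAIM (what is proved, stated in full; the proofs are below) =====
def Claim_unchanged_MinWeigth : Prop := ∀ (inp : List Int) (box : Int) (weigth : Int), Dom_MinWeigth inp box weigth → Spec_MinWeigth inp box weigth (MinWeigth inp box weigth)
def Claim_changed_MinWeigth : Prop := Dom_MinWeigth (pvDiffWitness_MinWeigth.1) (pvDiffWitness_MinWeigth.2.1) (pvDiffWitness_MinWeigth.2.2) ∧ D_MinWeigth (pvDiffWitness_MinWeigth.1) (pvDiffWitness_MinWeigth.2.1) (pvDiffWitness_MinWeigth.2.2) ∧ MinWeigth (pvDiffWitness_MinWeigth.1) (pvDiffWitness_MinWeigth.2.1) (pvDiffWitness_MinWeigth.2.2) = pvDiffWitnessOut_MinWeigth.1 ∧ MinWeigth_alt (pvDiffWitness_MinWeigth.1) (pvDiffWitness_MinWeigth.2.1) (pvDiffWitness_MinWeigth.2.2)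 = pvDiffWitnessOut_MinWeigth.2 ∧ pvDiffWitnessOut_MinWeigth.1 ≠ pvDiffWitnessOut_MinWeigth.2
def Claim_exact_MinWeigth : Prop := ∀ (inp : List Int) (box : Int) (weigth : Int), Dom_MinWeigth inp box weigth → D_MinWeigth inp box weigth → MinWeigth inp box weigth ≠ MinWeigth_alt inp box weigth

-- ===== LEMMAS AND PROOFS =====

-- B's counter never decreases.
theorem pvLoopB_mono (weigth : Int) : ∀ (rest : List Int) (used w u : Int),
    pvLoopB weigth rest used w = some u → used ≤ u := by
  intro rest
  induction rest with
  | nil => intro used w u h; simp [pvLoopB] at h; omega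
  | cons x rest ih =>
      intro used w u h
      simp only [pvLoopB] at h
      split at h
      · exact ih _ _ _ h
      · split at h
        · simp at h
        · have := ih _ _ _ h; omega

-- One box of A corresponds to a stretch of B's loop with a fixed `used`.
theorem pvInner_vs_B (weigth : Int) : ∀ (rest : List Int) (wib : Int),
    (pvInnerA weigth rest wib = none ∧
      ∀ used : Int, 1 ≤ used → pvLoopB weigth rest used wib = some used) ∨
    (∃ y rest' w', pvInnerA weigth rest wib = some (y, rest') ∧ weigth < w' + y ∧
      ∀ used : Int, 1 ≤ used →
        pvLoopB weigth rest used wib = pvLoopB weigth (y :: rest') used w') := by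
  intro rest
  induction rest with
  | nil => intro wib; left; exact ⟨rfl, fun _ _ => rfl⟩
  | cons x rest ih =>
      intro wib
      by_cases h : weigth ≥ x + wib
      · rcases ih (wib + x) with ⟨h1, h2⟩ | ⟨y, rest', w', h1, h2, h3⟩
        · left
          refine ⟨by simp [pvInnerA, h, h1], fun used hu => ?_⟩
          simp [pvLoopB, (by omega : used > 0), (by omega : weigth ≥ wib + x), h2 used hu]
        · right
          refine ⟨y, rest', w', by simp [pvInnerA, h, h1], h2, fun used hu => ?_⟩
          simp [pvLoopB, (by omega : used > 0), (by omega : weigth ≥ wib + x), h3 used hu]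
      · right
        exact ⟨x, rest, wib, by simp [pvInnerA, h], by omega, fun used hu => rfl⟩

theorem main_lemma (weigth : Int) : ∀ (k : Nat) (rem : List Int) (used w : Int),
    rem ≠ [] →
    ((used = 0 ∧ w = 0) ∨ (1 ≤ used ∧ ∀ x rest, rem = x :: rest → weigth < w + x)) →
    pvLoopA weigth k rem =
      (match pvLoopB weigth rem used w with
       | none => false
       | some u => decide (u ≤ used + (k : Int))) := by
  intro k
  induction k with
  | zero =>
      intro rem used w hne hinv
      cases rem with
      | nil => exact absurd rfl hne
      | cons x rest =>
        have hcond : ¬ (used > 0 ∧ weigth ≥ w + x) := by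
          rcases hinv with ⟨h1, h2⟩ | ⟨h1, h2⟩
          · omega
          · have := h2 x rest rfl; omega
        by_cases hx : x > weigth
        · simp [pvLoopA, pvLoopB, hcond, hx]
        · simp only [pvLoopB, if_neg hcond, if_neg hx]
          cases hB : pvLoopB weigth rest (used + 1) x with
          | none => simp [pvLoopA]
          | some u =>
              have := pvLoopB_mono weigth rest (used + 1) x u hB
              simp [pvLoopA]
              omega
  | succ k ih =>
      intro rem used w hne hinv
      cases rem with
      | nil => exact absurd rfl hne
      | cons x rest =>
        have hcond : ¬ (used > 0 ∧ weigth ≥ w + x) := by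
          rcases hinv with ⟨h1, h2⟩ | ⟨h1, h2⟩
          · omega
          · have := h2 x rest rfl; omega
        by_cases hx : x > weigth
        · have hA : pvLoopA weigth (k + 1) (x :: rest) = pvLoopA weigth k (x :: rest) := by
            simp only [pvLoopA, pvInnerA]
            rw [if_neg (by omega : ¬ weigth ≥ x + 0)]
          rw [hA, ih (x :: rest) used w (by simp) hinv]
          have hBn : pvLoopB weigth (x :: rest) used w = none := by
            simp only [pvLoopB]
            rw [if_neg hcond, if_pos hx]
          rw [hBn]
        · have hA : pvLoopA weigth (k + 1) (x :: rest) =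
              (match pvInnerA weigth rest x with
               | none => true
               | some (y, rem') => pvLoopA weigth k (y :: rem')) := by
            simp only [pvLoopA, pvInnerA]
            rw [if_pos (by omega : weigth ≥ x + 0), zero_add]
          have hB : pvLoopB weigth (x :: rest) used w = pvLoopB weigth rest (used + 1) x := by
            simp only [pvLoopB]
            rw [if_neg hcond, if_neg hx]
          rw [hA, hB]
          rcases pvInner_vs_B weigth rest x with ⟨h1, h2⟩ | ⟨y, rest', w', h1, h2, h3⟩
          · rw [h1, h2 (used + 1) (by omega)]
            show true = decide (used + 1 ≤ used + ((k + 1 : Nat) : Int))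
            symm
            rw [decide_eq_true_eq]
            push_cast
            omega
          · rw [h1, h3 (used + 1) (by omega)]
            show pvLoopA weigth k (y :: rest') = _
            rw [ih (y :: rest') (used + 1) w' (by simp)
                (Or.inr ⟨by omega, by intro a b hab; injection hab with hy hr; subst hy; exact h2⟩)]
            cases hB2 : pvLoopB weigth (y :: rest') (used + 1) w' with
            | none => rfl
            | some u =>
                simp only [decide_eq_decide]
                push_cast
                omega

theorem MinWeigth_spec : Claim_unchanged_MinWeigth := by
  intro inp box weigth _ hnd
  cases inp with
  | nil =>
      have hbox : box ≠ 0 := fun h => hnd ⟨rfl, h⟩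
      show MinWeigth [] box weigth = MinWeigth_alt [] box weigth
      simp only [MinWeigth, MinWeigth_alt, pvLoopB]
      cases hk : box.toNat with
      | zero =>
          simp only [pvLoopA]
          have : ¬ (0 ≤ box) := by omega
          simp [this]
      | succ k =>
          simp only [pvLoopA, pvInnerA]
          have : 0 ≤ box := by omega
          simp [this]
  | cons x rest =>
      show MinWeigth (x :: rest) box weigth = MinWeigth_alt (x :: rest) box weigth
      have h := main_lemma weigth box.toNat (x :: rest) 0 0 (by simp) (Or.inl ⟨rfl, rfl⟩)
      unfold MinWeigth MinWeigth_alt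
      rw [h]
      cases hB : pvLoopB weigth (x :: rest) 0 0 with
      | none => rfl
      | some u =>
          have hu : 1 ≤ u := by
            have h0 : ¬ ((0:Int) > 0 ∧ weigth ≥ 0 + x) := by omega
            simp only [pvLoopB, if_neg h0] at hB
            by_cases hx : x > weigth
            · simp [hx] at hB
            · rw [if_neg hx] at hB
              have := pvLoopB_mono weigth rest (0 + 1) x u hB
              omega
          simp only [decide_eq_decide]
          omega

theorem MinWeigth_changed : Claim_changed_MinWeigth := by unfold Claim_changed_MinWeigth; decide

theorem MinWeigth_tight : Claim_exact_MinWeigth := by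
  intro inp box weigth _ hd
  obtain ⟨h1, h2⟩ := hd
  subst h1; subst h2
  simp [MinWeigth, MinWeigth_alt, pvLoopA, pvLoopB]
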